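-- pv_equiv track=rewrite | github.com/gentlegant/leetcode | class/数组查询.py | solve
-- ===== SOURCE A (Python) =====
-- def solve( nums):
--     res=0
--     dp1=[0]*len(nums)
--     dp2=dp1.copy()
--     dp1[0]=nums[0]
--     dp2[-1]=nums[-1]
--     for i in range(1,len(nums)):
--         dp1[i]=max(0,dp1[i-1])+nums[i]
--     for i in range(len(nums)-2,-1,-1):
--         dp2[i]=max(0,dp2[i+1])+nums[i]
--
--     for i in range(1,len(nums)-1):
--
--         res=max(res,dp1[i-1]+dp2[i+1]+max(nums[i],0))
--
--     return res
-- ===== SOURCE B (Python) =====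
-- def solve(nums):
--     # prefix sums: S[j] = nums[0]+...+nums[j-1]
--     S = [0]
--     acc = 0
--     for x in nums:
--         acc += x
--         S.append(acc)
--     n = len(nums)
--     # M[k] = max(S[k], ..., S[n])
--     M = [0] * (n + 1)
--     M[-1] = S[-1]
--     for k in range(n - 1, -1, -1):
--         M[k] = max(S[k], M[k + 1])
--     res = 0
--     mn = S[0]  # running min of S[0..i-1]
--     for i in range(1, n - 1):
--         res = max(res, S[i] - mn + M[i + 2] - S[i + 1] + max(nums[i], 0))
--         mn = min(mn, S[i])
--     return res
-- ===== Notes on version B (the rewrite author's own statement) =====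
-- stated objective: alternative
-- what changed: B abandons the two Kadane DP recurrences and instead works on prefix sums: it builds the prefix-sum list S, a suffix-max array over S, and scans the middle indices with a running minimum of S, computing each candidate as (S[i]-minprefix) + (suffixmax-S[i+1]) + max(nums[i],0).
import Mathlib
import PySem

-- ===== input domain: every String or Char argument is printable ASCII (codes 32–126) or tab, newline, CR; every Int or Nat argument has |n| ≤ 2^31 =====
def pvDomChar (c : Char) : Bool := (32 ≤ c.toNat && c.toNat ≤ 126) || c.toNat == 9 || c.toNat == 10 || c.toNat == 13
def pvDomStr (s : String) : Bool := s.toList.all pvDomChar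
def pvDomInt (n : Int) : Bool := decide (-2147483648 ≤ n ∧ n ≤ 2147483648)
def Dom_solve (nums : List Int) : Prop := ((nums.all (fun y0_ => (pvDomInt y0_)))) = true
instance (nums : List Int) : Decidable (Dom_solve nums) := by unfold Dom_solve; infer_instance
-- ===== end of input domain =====

-- B replaces A's two Kadane DP arrays by prefix sums with a suffix-max array and a
-- running prefix-min (a different algorithm of the same O(n) cost: objective 'alternative').

-- ===== PORT A =====
def solve (nums : List Int) : Int :=
  let res : Int := 0
  let n : Int := (nums.length : Int)
  let dp1 : List Int := List.replicate nums.length 0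
  let dp2 : List Int := dp1
  let dp1 := PySem.List.pySetD dp1 0 (PySem.List.pyGetD nums 0 0)
  let dp2 := PySem.List.pySetD dp2 (-1) (PySem.List.pyGetD nums (-1) 0)
  let dp1 := (PySem.List.pyRange 1 n 1).foldl
      (fun d i => PySem.List.pySetD d i
        (max 0 (PySem.List.pyGetD d (i - 1) 0) + PySem.List.pyGetD nums i 0)) dp1
  let dp2 := (PySem.List.pyRange (n - 2) (-1) (-1)).foldl
      (fun d i => PySem.List.pySetD d i
        (max 0 (PySem.List.pyGetD d (i + 1) 0) + PySem.List.pyGetD nums i 0)) dp2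
  (PySem.List.pyRange 1 (n - 1) 1).foldl
      (fun r i => max r (PySem.List.pyGetD dp1 (i - 1) 0 +
        PySem.List.pyGetD dp2 (i + 1) 0 + max (PySem.List.pyGetD nums i 0) 0)) res

-- ===== PORT B =====
def solve_alt (nums : List Int) : Int :=
  -- S = [0]; acc = 0; for x in nums: acc += x; S.append(acc)
  let p := nums.foldl (fun (p : List Int × Int) x => (p.1 ++ [p.2 + x], p.2 + x)) ([0], 0)
  let S := p.1
  let n : Int := (nums.length : Int)
  -- M = [0]*(n+1); M[-1] = S[-1]; for k in range(n-1,-1,-1): M[k] = max(S[k], M[k+1])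
  let M : List Int := List.replicate (nums.length + 1) 0
  let M := PySem.List.pySetD M (-1) (PySem.List.pyGetD S (-1) 0)
  let M := (PySem.List.pyRange (n - 1) (-1) (-1)).foldl
      (fun m k => PySem.List.pySetD m k
        (max (PySem.List.pyGetD S k 0) (PySem.List.pyGetD m (k + 1) 0))) M
  -- res = 0; mn = S[0]; forward scan
  let st := (PySem.List.pyRange 1 (n - 1) 1).foldl
      (fun (st : Int × Int) i =>
        (max st.1 (PySem.List.pyGetD S i 0 - st.2 + PySem.List.pyGetD M (i + 2) 0 -
           PySem.List.pyGetD S (i + 1) 0 + max (PySem.List.pyGetD nums i 0) 0),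
         min st.2 (PySem.List.pyGetD S i 0))) (0, PySem.List.pyGetD S 0 0)
  st.1

-- ===== PRECONDITION & SPEC =====
-- Pre_ excludes only the empty list, on which A raises IndexError (dp1[0]=nums[0]).
def Pre_solve (nums : List Int) : Prop := nums ≠ []
instance (nums : List Int) : Decidable (Pre_solve nums) := by unfold Pre_solve; infer_instance
def pvWitness_solve : List Int := [2, -1, 3, -2, 4]

def Spec_solve (nums : List Int) (out : Int) : Prop := out = solve_alt nums
instance (nums : List Int) (out : Int) : Decidable (Spec_solve nums out) := by unfold Spec_solve; infer_instance

-- ===== CLAIM (what is proved, stated in full; the proofs are below) =====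
def Claim_equal_solve : Prop := ∀ (nums : List Int), Dom_solve nums → Pre_solve nums → Spec_solve nums (solve nums)

-- ===== LEMMAS AND PROOFS =====

-- prefix sum of the first j elements (B's S[j])
def pvP (nums : List Int) (j : Nat) : Int := ((nums.take j).sum)

-- best subarray sum ending at index j (A's dp1[j])
def pvFe (nums : List Int) : Nat → Int
  | 0 => PySem.List.pyGetD nums 0 0
  | j + 1 => max 0 (pvFe nums j) + PySem.List.pyGetD nums ((j : Int) + 1) 0

-- best subarray sum starting at index j (A's dp2[j])
def pvBe (nums : List Int) (j : Nat) : Int :=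
  if _h : j + 1 < nums.length then
    max 0 (pvBe nums (j + 1)) + PySem.List.pyGetD nums (j : Int) 0
  else PySem.List.pyGetD nums (j : Int) 0
termination_by nums.length - j

-- min of pvP over 0..j (B's running mn)
def pvMn (nums : List Int) : Nat → Int
  | 0 => 0
  | j + 1 => min (pvMn nums j) (pvP nums (j + 1))

-- max of pvP over k..n (B's M[k])
def pvMx (nums : List Int) (k : Nat) : Int :=
  if _h : k < nums.length then max (pvP nums k) (pvMx nums (k + 1))
  else pvP nums k
termination_by nums.length - k

lemma pvP_succ (nums : List Int) (j : Nat) (hj : j < nums.length) :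
    pvP nums (j + 1) = pvP nums j + PySem.List.pyGetD nums (j : Int) 0 := by
  rw [PySem.List.pyGetD_eq_getElem _ _ (by omega) (by simp; omega)]
  simp only [Int.toNat_natCast]
  exact List.sum_take_succ nums j hj
lemma pvSget (nums : List Int) (j : Nat) (hj : j ≤ nums.length) :
    PySem.List.pyGetD ((List.range (nums.length + 1)).map (pvP nums)) (j : Int) 0
      = pvP nums j := by
  rw [PySem.List.pyGetD_natCast]
  rw [List.getD_eq_getElem?_getD]
  simp [List.getElem?_map, List.getElem?_range (by omega : j < nums.length + 1)]

lemma pvI1 (nums : List Int) : ∀ j : Nat, j < nums.length →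
    pvFe nums j = pvP nums (j + 1) - pvMn nums j := by
  intro j
  induction j with
  | zero =>
    intro h
    rw [pvFe, pvMn, pvP_succ nums 0 h]
    simp [pvP]
  | succ j ih =>
    intro h
    rw [pvFe, pvMn, pvP_succ nums (j + 1) h, ih (by omega)]
    rw [show ((j : Int) + 1) = (((j + 1 : Nat)) : Int) by push_cast; ring]
    omega
lemma pvMx_unfold (nums : List Int) (k : Nat) :
    pvMx nums k = if k < nums.length then max (pvP nums k) (pvMx nums (k + 1)) else pvP nums k := by
  conv_lhs => rw [pvMx]
  split_ifs with h <;> rfl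
lemma pvI2 (nums : List Int) : ∀ m j : Nat, nums.length - j ≤ m → j < nums.length →
    pvBe nums j = pvMx nums (j + 1) - pvP nums j := by
  intro m
  induction m with
  | zero => intro j h1 h2; omega
  | succ m ih =>
    intro j h1 h2
    have hps := pvP_succ nums j h2
    rw [pvBe]
    by_cases hj : j + 1 < nums.length
    · rw [dif_pos hj, ih (j + 1) (by omega) hj]
      have hu := pvMx_unfold nums (j + 1)
      rw [if_pos hj] at hu
      omega
    · rw [dif_neg hj]
      have hu := pvMx_unfold nums (j + 1)
      rw [if_neg (by omega)] at hu
      omega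
lemma pvP_append_le (l : List Int) (x : Int) (j : Nat) (hj : j ≤ l.length) :
    pvP (l ++ [x]) j = pvP l j := by
  simp [pvP, List.take_append_of_le_length hj]
lemma pvSfold (nums : List Int) :
    nums.foldl (fun (p : List Int × Int) x => (p.1 ++ [p.2 + x], p.2 + x)) ([0], 0)
      = ((List.range (nums.length + 1)).map (pvP nums), pvP nums nums.length) := by
  induction nums using List.reverseRecOn with
  | nil => simp [pvP]
  | append_singleton l x ih =>
    rw [List.foldl_append, ih]
    simp only [List.foldl]
    have h1 : pvP (l ++ [x]) (l.length + 1) = pvP l l.length + x := by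
      simp [pvP]
    refine Prod.ext ?_ ?_ <;> simp only
    · rw [List.length_append, List.length_singleton, List.range_succ (n := l.length + 1),
        List.map_append]
      congr 1
      · exact (List.map_congr_left (fun j hj =>
          (pvP_append_le l x j (by simpa using List.mem_range.mp hj)).symm))
      · simp [h1]
    · rw [List.length_append, List.length_singleton, h1]
lemma pvSetLast (xs : List Int) (v : Int) (h : xs ≠ []) :
    PySem.List.pySetD xs (-1) v = xs.set (xs.length - 1) v := by
  unfold PySem.List.pySetD PySem.List.pySet?
  have hl : 0 < xs.length := List.length_pos_of_ne_nil h
  rw [PySem.List.pyIdx?, if_neg (by omega), if_pos (by omega)]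
  simp
lemma pvBack (g : Int → Int → Int) (f : Nat → Int) (N : Nat)
    (hrec : ∀ j : Nat, j + 1 < N → f j = g (j : Int) (f (j + 1))) :
    ∀ (k : Nat) (a : Int), a + 1 = (k : Int) → a ≤ (N : Int) - 2 →
    ∀ (d : List Int), d.length = N →
    (∀ j : Nat, a < (j : Int) → j < N → PySem.List.pyGetD d (j : Int) 0 = f j) →
    ∀ j : Nat, j < N →
      PySem.List.pyGetD
        ((PySem.List.pyRange a (-1) (-1)).foldl
          (fun m i => PySem.List.pySetD m i (g i (PySem.List.pyGetD m (i + 1) 0))) d)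
        (j : Int) 0 = f j := by
  intro k
  induction k with
  | zero =>
    intro a ha _ d _ hinv j hj
    rw [PySem.List.pyRange_neg_one_eq_nil (by omega)]
    exact hinv j (by omega) hj
  | succ k ih =>
    intro a ha haN d hd hinv j hj
    rw [PySem.List.pyRange_neg_one_cons (by omega)]
    simp only [List.foldl]
    have hak : a = (k : Int) := by omega
    have hkN : k + 1 < N := by omega
    -- value read at a+1 is f (k+1)
    have hread : PySem.List.pyGetD d (a + 1) 0 = f (k + 1) := by
      rw [show a + 1 = ((k + 1 : Nat) : Int) by omega]
      exact hinv (k + 1) (by omega) hkN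
    refine ih (a - 1) (by omega) (by omega) _ (by simp [PySem.List.length_pySetD, hd]) ?_ j hj
    intro j' hj' hj'N
    rw [hak, PySem.List.pyGetD_pySetD_natCast _ k j' _ _ (by omega)]
    by_cases hjk : j' = k
    · rw [if_pos hjk, hjk, hrec k hkN]
      rw [← hak, hread]
    · rw [if_neg hjk]
      exact hinv j' (by omega) hj'N
lemma pvMain (nums dp1f dp2f Sf Mf : List Int)
    (hd1 : ∀ j : Nat, j < nums.length → PySem.List.pyGetD dp1f (j : Int) 0 = pvFe nums j)
    (hd2 : ∀ j : Nat, j < nums.length → PySem.List.pyGetD dp2f (j : Int) 0 = pvBe nums j)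
    (hS : ∀ j : Nat, j ≤ nums.length → PySem.List.pyGetD Sf (j : Int) 0 = pvP nums j)
    (hM : ∀ j : Nat, j ≤ nums.length → PySem.List.pyGetD Mf (j : Int) 0 = pvMx nums j) :
    ∀ (m aN : Nat), 1 ≤ aN → (aN : Int) + m = (nums.length : Int) - 1 →
    ∀ r mn : Int, mn = pvMn nums (aN - 1) →
    ((PySem.List.pyRange (aN : Int) ((nums.length : Int) - 1) 1).foldl
       (fun (st : Int × Int) i =>
         (max st.1 (PySem.List.pyGetD Sf i 0 - st.2 + PySem.List.pyGetD Mf (i + 2) 0 -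
            PySem.List.pyGetD Sf (i + 1) 0 + max (PySem.List.pyGetD nums i 0) 0),
          min st.2 (PySem.List.pyGetD Sf i 0))) (r, mn)).1
    = (PySem.List.pyRange (aN : Int) ((nums.length : Int) - 1) 1).foldl
       (fun r i => max r (PySem.List.pyGetD dp1f (i - 1) 0 +
          PySem.List.pyGetD dp2f (i + 1) 0 + max (PySem.List.pyGetD nums i 0) 0)) r := by
  intro m
  induction m with
  | zero =>
    intro aN _ ham r mn _
    rw [PySem.List.pyRange_one_eq_nil (by omega)]
    rfl
  | succ m ih =>
    intro aN ha1 ham r mn hmn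
    rw [PySem.List.pyRange_one_cons (by omega)]
    simp only [List.foldl]
    -- rewrite all the indexed reads
    have e1 : (aN : Int) + 1 = ((aN + 1 : Nat) : Int) := by omega
    have e2 : (aN : Int) + 2 = ((aN + 2 : Nat) : Int) := by omega
    have e3 : (aN : Int) - 1 = ((aN - 1 : Nat) : Int) := by omega
    rw [e1, e2, e3, hS aN (by omega), hS (aN + 1) (by omega), hM (aN + 2) (by omega),
      hd1 (aN - 1) (by omega), hd2 (aN + 1) (by omega)]
    have h1 := pvI1 nums (aN - 1) (by omega)
    rw [show aN - 1 + 1 = aN from by omega] at h1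
    have h2 := pvI2 nums nums.length (aN + 1) (by omega) (by omega)
    rw [show aN + 1 + 1 = aN + 2 from by omega] at h2
    have hterm : pvP nums aN - mn + pvMx nums (aN + 2) - pvP nums (aN + 1) +
        max (PySem.List.pyGetD nums (aN : Int) 0) 0
        = pvFe nums (aN - 1) + pvBe nums (aN + 1) +
          max (PySem.List.pyGetD nums (aN : Int) 0) 0 := by
      rw [h1, h2, hmn]; ring
    rw [hterm]
    have hmn' : min mn (pvP nums aN) = pvMn nums ((aN + 1) - 1) := by
      rw [show (aN + 1) - 1 = (aN - 1) + 1 from by omega, pvMn,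
        show aN - 1 + 1 = aN from by omega, hmn]
    exact ih (aN + 1) (by omega) (by omega)
      (max r (pvFe nums (aN - 1) + pvBe nums (aN + 1) + max (PySem.List.pyGetD nums (aN : Int) 0) 0))
      (min mn (pvP nums aN)) hmn'

-- A's forward-pass fold preserves the length of the dp list
lemma pvLen1 (nums : List Int) (l : List Int) (d : List Int) :
    (l.foldl (fun d i => PySem.List.pySetD d i
        (max 0 (PySem.List.pyGetD d (i - 1) 0) + PySem.List.pyGetD nums i 0)) d).length
      = d.length := by
  induction l generalizing d with
  | nil => rfl
  | cons x xs ih => simp [List.foldl, ih, PySem.List.length_pySetD]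

-- characterisation of A's dp1 array: after the forward pass up to k, entry j is pvFe j
lemma pvDp1 (nums : List Int) (hne : nums ≠ []) :
    ∀ k : Nat, 1 ≤ k → k ≤ nums.length →
    ∀ j : Nat, j < k →
      PySem.List.pyGetD
        ((PySem.List.pyRange 1 (k : Int) 1).foldl
          (fun d i => PySem.List.pySetD d i
            (max 0 (PySem.List.pyGetD d (i - 1) 0) + PySem.List.pyGetD nums i 0))
          (PySem.List.pySetD (List.replicate nums.length 0) 0 (PySem.List.pyGetD nums 0 0)))
        (j : Int) 0 = pvFe nums j := by
  have hlen : 0 < nums.length := List.length_pos_of_ne_nil hne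
  intro k
  induction k with
  | zero => omega
  | succ k ih =>
    intro _ hk j hjk
    by_cases h1 : k = 0
    · subst h1
      have hj : j = 0 := by omega
      subst hj
      rw [show ((1 : Nat) : Int) = 1 by norm_num, PySem.List.pyRange_one_eq_nil (by norm_num)]
      simp only [List.foldl]
      rw [PySem.List.pySetD_of_nonneg _ _ (by norm_num)]
      rw [PySem.List.pyGetD_eq_getElem _ _ (by norm_num) (by simp; exact_mod_cast hlen)]
      simp only [Int.toNat_natCast, Int.toNat_zero]
      rw [List.getElem_set_self (h := by simpa using hlen)]
      rfl
    · have hk1 : 1 ≤ k := by omega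
      have hsplit : PySem.List.pyRange 1 ((k + 1 : Nat) : Int) 1
          = PySem.List.pyRange 1 (k : Int) 1 ++ [(k : Int)] := by
        rw [show ((k + 1 : Nat) : Int) = (k : Int) + 1 by push_cast; ring]
        exact PySem.List.pyRange_one_succ_right (by exact_mod_cast hk1)
      rw [hsplit, List.foldl_append]
      simp only [List.foldl]
      have hlend : ((PySem.List.pyRange 1 (k : Int) 1).foldl
          (fun d i => PySem.List.pySetD d i
            (max 0 (PySem.List.pyGetD d (i - 1) 0) + PySem.List.pyGetD nums i 0))
          (PySem.List.pySetD (List.replicate nums.length 0) 0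
            (PySem.List.pyGetD nums 0 0))).length = nums.length := by
        rw [pvLen1]
        simp [PySem.List.length_pySetD]
      rw [PySem.List.pyGetD_pySetD_natCast _ k j _ _ (by omega)]
      rw [show (k : Int) - 1 = ((k - 1 : Nat) : Int) by omega]
      rw [ih hk1 (by omega) (k - 1) (by omega)]
      by_cases hjk' : j = k
      · rw [if_pos hjk', hjk']
        rw [show k = (k - 1) + 1 by omega]
        rw [pvFe]
        congr 2
      · rw [if_neg hjk', ih hk1 (by omega) j (by omega)]

-- ===== VERDICT (by name: the statement is the Claim_ definition above) =====
theorem solve_spec : Claim_equal_solve := by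
  intro nums _ hpre
  unfold Spec_solve
  have hne : nums ≠ [] := hpre
  have hlen : 0 < nums.length := List.length_pos_of_ne_nil hne
  simp only [solve, solve_alt, pvSfold]
  -- dp1 characterisation
  have hd1 := pvDp1 nums hne nums.length hlen le_rfl
  -- last element of nums
  have hlast : PySem.List.pyGetD nums (-1) 0 = pvBe nums (nums.length - 1) := by
    rw [PySem.List.pyGetD_neg_one (h := hne), pvBe, dif_neg (by omega)]
    rw [PySem.List.pyGetD_eq_getElem _ _ (by omega) (by simp; omega)]
    simp [List.getLast_eq_getElem]
  -- dp2 characterisation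
  have hd2 : ∀ j : Nat, j < nums.length →
      PySem.List.pyGetD
        ((PySem.List.pyRange ((nums.length : Int) - 2) (-1) (-1)).foldl
          (fun d i => PySem.List.pySetD d i
            (max 0 (PySem.List.pyGetD d (i + 1) 0) + PySem.List.pyGetD nums i 0))
          (PySem.List.pySetD (List.replicate nums.length 0) (-1) (PySem.List.pyGetD nums (-1) 0)))
        (j : Int) 0 = pvBe nums j := by
    refine pvBack (fun i v => max 0 v + PySem.List.pyGetD nums i 0) (pvBe nums) nums.length
      (fun j hj => by rw [pvBe, dif_pos hj]) (nums.length - 1) ((nums.length : Int) - 2)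
      (by omega) (by omega) _ ?_ ?_
    · rw [pvSetLast _ _ (by simpa using hne)]
      simp
    · intro j hj hjN
      have hj' : j = nums.length - 1 := by omega
      subst hj'
      rw [pvSetLast _ _ (by simpa using hne)]
      rw [PySem.List.pyGetD_natCast, List.getD_eq_getElem?_getD]
      simp only [List.length_replicate]
      rw [List.getElem?_set_self (by simp; omega)]
      simpa using hlast
  -- S characterisation
  have hS : ∀ j : Nat, j ≤ nums.length →
      PySem.List.pyGetD ((List.range (nums.length + 1)).map (pvP nums)) (j : Int) 0
        = pvP nums j := fun j hj => pvSget nums j hj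
  -- last entry of S
  have hSlast : PySem.List.pyGetD ((List.range (nums.length + 1)).map (pvP nums)) (-1) 0
      = pvMx nums nums.length := by
    rw [PySem.List.pyGetD_neg_one (h := by simp), pvMx_unfold, if_neg (by omega)]
    rw [List.getLast_eq_getElem]
    simp
  -- M characterisation
  have hM : ∀ j : Nat, j ≤ nums.length →
      PySem.List.pyGetD
        ((PySem.List.pyRange ((nums.length : Int) - 1) (-1) (-1)).foldl
          (fun m k => PySem.List.pySetD m k
            (max (PySem.List.pyGetD ((List.range (nums.length + 1)).map (pvP nums)) k 0)
              (PySem.List.pyGetD m (k + 1) 0)))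
          (PySem.List.pySetD (List.replicate (nums.length + 1) 0) (-1)
            (PySem.List.pyGetD ((List.range (nums.length + 1)).map (pvP nums)) (-1) 0)))
        (j : Int) 0 = pvMx nums j := by
    intro j hj
    refine pvBack
      (fun k v => max (PySem.List.pyGetD ((List.range (nums.length + 1)).map (pvP nums)) k 0) v)
      (pvMx nums) (nums.length + 1)
      (fun j hj => by
        show pvMx nums j = max (PySem.List.pyGetD
          ((List.range (nums.length + 1)).map (pvP nums)) (j : Int) 0) (pvMx nums (j + 1))
        rw [pvMx_unfold, if_pos (by omega), hS j (by omega)])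
      nums.length ((nums.length : Int) - 1) (by omega) (by omega) _ ?_ ?_ j (by omega)
    · rw [pvSetLast _ _ (by simp)]
      simp
    · intro j' hj' hj'N
      have hj'' : j' = nums.length := by omega
      subst hj''
      rw [pvSetLast _ _ (by simp)]
      rw [PySem.List.pyGetD_natCast, List.getD_eq_getElem?_getD]
      simp only [List.length_replicate]
      rw [show nums.length + 1 - 1 = nums.length from by omega,
        List.getElem?_set_self (by simp)]
      simpa using hSlast
  by_cases h2 : 2 ≤ nums.length
  · rw [show (1 : Int) = ((1 : Nat) : Int) by norm_num]
    exact (pvMain nums _ _ _ _ hd1 hd2 hS hM (nums.length - 2) 1 le_rfl (by omega) 0 _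
      (by have h0 := hS 0 (by omega); norm_num at h0; rw [h0]; simp [pvP, pvMn])).symm
  · have h1 : nums.length = 1 := by omega
    rw [h1]
    rw [show ((1 : Nat) : Int) - 1 = 0 by norm_num]
    rw [PySem.List.pyRange_one_eq_nil (a := 1) (b := 0) (by norm_num)]
    rfl
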